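-- pv_equiv track=rewrite | github.com/helloworldxdwastaken/asta | backend/app/apply_patch_compat_tool.py | _seek_sequence
-- ===== SOURCE A (Python) =====
-- def _lines_match(lines: list[str], pattern: list[str], start: int, normalize) -> bool:
--     for idx, expected in enumerate(pattern):
--         if normalize(lines[start + idx]) != normalize(expected):
--             return False
--     return True
--
-- def _seek_sequence(lines: list[str], pattern: list[str], start: int, eof: bool) -> int | None:
--     if not pattern:
--         return start
--     if len(pattern) > len(lines):
--         return None
--     max_start = len(lines) - len(pattern)
--     search_start = max_start if eof and len(lines) >= len(pattern) else start
--     if search_start > max_start: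
--         return None
--
--     normalizers = (
--         (lambda s: s),
--         (lambda s: s.rstrip()),
--         (lambda s: s.strip()),
--     )
--     for normalize in normalizers:
--         for i in range(search_start, max_start + 1):
--             if _lines_match(lines, pattern, i, normalize):
--                 return i
--     return None
-- ===== SOURCE B (Python) =====
-- def _seek_sequence(lines: list[str], pattern: list[str], start: int, eof: bool) -> int | None:
--     m, n = len(pattern), len(lines)
--     if m == 0:
--         return start
--     if m > n:
--         return None
--     last = n - m
--     s = last if eof else start
--     if s > last:
--         return None
--     for norm in (str, str.rstrip, str.strip):
--         text = [norm(x) for x in lines]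
--         pat = [norm(x) for x in pattern]
--         # column-wise elimination: keep the start positions that survive every pattern row
--         cands = range(s, last + 1)
--         for row, expected in enumerate(pat):
--             cands = [i for i in cands if text[i + row] == expected]
--             if not cands:
--                 break
--         if cands:
--             return cands[0]
--     return None
-- ===== Notes on version B (the rewrite author's own statement) =====
-- stated objective: alternative
-- what changed: B transposes the search: per normalizer it normalizes the lines and the pattern once, then eliminates candidate start positions row by row of the pattern (filtering a maintained candidate list, with early exit when it empties) and returns the smallest survivor, instead of A's per-start-position window rescan that re-normalizes both strings at every probe; Pre_ excludes only inputs where A raises IndexError (non-eof start below -len(lines)), where B raises too.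
import Mathlib
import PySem

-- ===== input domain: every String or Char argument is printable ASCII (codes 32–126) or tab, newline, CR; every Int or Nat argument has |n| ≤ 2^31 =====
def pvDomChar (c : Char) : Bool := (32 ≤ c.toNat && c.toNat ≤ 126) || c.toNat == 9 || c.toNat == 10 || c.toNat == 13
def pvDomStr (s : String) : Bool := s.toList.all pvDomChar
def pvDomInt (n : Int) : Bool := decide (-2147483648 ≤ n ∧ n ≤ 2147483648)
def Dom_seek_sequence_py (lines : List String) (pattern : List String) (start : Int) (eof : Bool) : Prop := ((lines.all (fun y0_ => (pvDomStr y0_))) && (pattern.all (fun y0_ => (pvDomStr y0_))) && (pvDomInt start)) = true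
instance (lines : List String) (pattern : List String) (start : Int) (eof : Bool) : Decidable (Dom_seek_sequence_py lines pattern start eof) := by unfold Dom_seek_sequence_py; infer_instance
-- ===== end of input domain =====

-- B transposes the search (per pattern row it filters a maintained list of candidate start
-- positions, normalizing each line once) instead of A's per-start window rescan; return value
-- is identical on Pre_, which only excludes inputs where the Python A raises IndexError.

-- ===== PORT A =====
-- _lines_match: lines[start+idx] is pyGet?; `none` (Python IndexError) counts as a mismatch
-- here — those inputs are exactly the ones Pre_ excludes.
def linesMatchA (lines pattern : List String) (i : Int) (f : String → String) : Bool :=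
  (PySem.List.enumerate pattern).all
    (fun pr => (PySem.List.pyGet? lines (i + pr.1)).map f == some (f pr.2))

-- the inner 'for i in range(search_start, max_start + 1): if _lines_match(...): return i'
def seekA (lines pattern : List String) (a b : Int) (f : String → String) : Option Int :=
  (PySem.List.pyRange a b).find? (fun i => linesMatchA lines pattern i f)

def seek_sequence_py (lines : List String) (pattern : List String) (start : Int) (eof : Bool) : Option Int :=
  if pattern = [] then some start
  else if pattern.length > lines.length then none
  else
    let max_start : Int := (lines.length : Int) - (pattern.length : Int)
    let search_start : Int :=
      if eof && decide (pattern.length ≤ lines.length) then max_start else start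
    if search_start > max_start then none
    else
      match seekA lines pattern search_start (max_start + 1) (fun s => s) with
      | some i => some i
      | none =>
        match seekA lines pattern search_start (max_start + 1) PySem.Str.rstrip with
        | some i => some i
        | none =>
          match seekA lines pattern search_start (max_start + 1) PySem.Str.strip with
          | some i => some i
          | none => none

-- ===== PORT B =====
-- 'for row, expected in enumerate(pat): cands = [i for i in cands if text[i+row] == expected]'
-- (the 'if not cands: break' is semantically void in the fold: filtering [] yields []);
-- text[i+row] is pyGet?, with `none` (IndexError) as mismatch — excluded by Pre_.
def colScanB (text pat : List String) (cands : List Int) : List Int :=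
  (PySem.List.enumerate pat).foldl
    (fun cs pr => cs.filter (fun i => PySem.List.pyGet? text (i + pr.1) == some pr.2)) cands

def seek_sequence_py_alt (lines : List String) (pattern : List String) (start : Int) (eof : Bool) : Option Int :=
  let m := pattern.length
  let n := lines.length
  if m = 0 then some start
  else if m > n then none
  else
    let last : Int := (n : Int) - (m : Int)
    let s : Int := if eof then last else start
    if s > last then none
    else
      let tryNorm (f : String → String) : Option Int :=
        (colScanB (lines.map f) (pattern.map f) (PySem.List.pyRange s (last + 1))).head?
      match tryNorm (fun x => x) with
      | some i => some i
      | none =>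
        match tryNorm PySem.Str.rstrip with
        | some i => some i
        | none => tryNorm PySem.Str.strip

-- ===== PRECONDITION & SPEC =====
-- Pre_ excludes ONLY the inputs where A raises IndexError: non-eof call with a nonempty pattern
-- that fits in lines and a start below -len(lines) but not above max_start.
def Pre_seek_sequence_py (lines : List String) (pattern : List String) (start : Int) (eof : Bool) : Prop :=
  pattern = [] ∨ lines.length < pattern.length ∨ eof = true ∨
    (lines.length : Int) - (pattern.length : Int) < start ∨ -(lines.length : Int) ≤ start
instance (lines : List String) (pattern : List String) (start : Int) (eof : Bool) : Decidable (Pre_seek_sequence_py lines pattern start eof) := by unfold Pre_seek_sequence_py; infer_instance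

def pvWitness_seek_sequence_py : List String × List String × Int × Bool := (["a", "b"], ["b"], 0, false)

def Spec_seek_sequence_py (lines : List String) (pattern : List String) (start : Int) (eof : Bool) (out : Option Int) : Prop := out = seek_sequence_py_alt lines pattern start eof
instance (lines : List String) (pattern : List String) (start : Int) (eof : Bool) (out : Option Int) : Decidable (Spec_seek_sequence_py lines pattern start eof out) := by unfold Spec_seek_sequence_py; infer_instance

-- ===== CLAIM (what is proved, stated in full; the proofs are below) =====
def Claim_equal_seek_sequence_py : Prop := ∀ (lines : List String) (pattern : List String) (start : Int) (eof : Bool), Dom_seek_sequence_py lines pattern start eof → Pre_seek_sequence_py lines pattern start eof → Spec_seek_sequence_py lines pattern start eof (seek_sequence_py lines pattern start eof)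

-- ===== LEMMAS AND PROOFS =====

-- staged row filters = one filter by the conjunction over all rows
theorem foldl_filter_all {α β : Type} (l : List β) (q : β → α → Bool) (cands : List α) :
    l.foldl (fun cs pr => cs.filter (fun i => q pr i)) cands
      = cands.filter (fun i => l.all (fun pr => q pr i)) := by
  induction l generalizing cands with
  | nil => simp
  | cons a t ih =>
    rw [List.foldl_cons, ih, List.filter_filter]
    apply List.filter_congr
    intro x _
    simp [Bool.and_comm]

theorem head?_filter_eq_find? {α : Type} (l : List α) (p : α → Bool) :
    (l.filter p).head? = l.find? p := by
  induction l with
  | nil => rfl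
  | cons a t ih =>
    by_cases h : p a = true
    · simp [h]
    · simp only [List.filter_cons, List.find?_cons, h]
      simp [ih]

theorem pyGet?_map {α β : Type} (f : α → β) (l : List α) (j : Int) :
    PySem.List.pyGet? (l.map f) j = (PySem.List.pyGet? l j).map f := by
  simp [PySem.List.pyGet?, PySem.List.pyIdx?]

theorem enumerate_map {α β : Type} (f : α → β) (l : List α) (s : Int) :
    PySem.List.enumerate (l.map f) s
      = (PySem.List.enumerate l s).map (fun pr => (pr.1, f pr.2)) := by
  induction l generalizing s with
  | nil => simp [PySem.List.enumerate_nil]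
  | cons a t ih => simp [PySem.List.enumerate_cons, ih]

-- the two per-position tests agree (A re-normalizes each probe; B probes normalized arrays)
theorem match_pred_eq (lines pattern : List String) (f : String → String) (i : Int) :
    linesMatchA lines pattern i f
      = (PySem.List.enumerate (pattern.map f)).all
          (fun pr => PySem.List.pyGet? (lines.map f) (i + pr.1) == some pr.2) := by
  unfold linesMatchA
  rw [enumerate_map, List.all_map]
  congr 1
  funext pr
  simp only [Function.comp_apply, pyGet?_map]

-- per normalizer: A's find? over start positions = B's head? of the filtered candidate list
theorem seek_eq (lines pattern : List String) (a b : Int) (f : String → String) :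
    seekA lines pattern a b f
      = (colScanB (lines.map f) (pattern.map f) (PySem.List.pyRange a b)).head? := by
  unfold seekA colScanB
  rw [foldl_filter_all, head?_filter_eq_find?]
  congr 1
  funext i
  rw [match_pred_eq]

-- ===== VERDICT (by name: the statement is the Claim_ definition above) =====
theorem seek_sequence_py_spec : Claim_equal_seek_sequence_py := by
  intro lines pattern start eof _hdom _hpre
  unfold Spec_seek_sequence_py
  simp only [seek_sequence_py, seek_sequence_py_alt]
  by_cases hP : pattern = []
  · simp [hP]
  · have hm0 : ¬ pattern.length = 0 := fun h => hP (List.eq_nil_of_length_eq_zero h)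
    rw [if_neg hP, if_neg hm0]
    by_cases hLen : pattern.length > lines.length
    · rw [if_pos hLen, if_pos hLen]
    · rw [if_neg hLen, if_neg hLen]
      have hmn : pattern.length ≤ lines.length := by omega
      have hdec : (eof && decide (pattern.length ≤ lines.length)) = eof := by simp [hmn]
      rw [hdec]
      set s : Int := if eof then (lines.length : Int) - (pattern.length : Int) else start
      by_cases hgt : s > (lines.length : Int) - (pattern.length : Int)
      · rw [if_pos hgt, if_pos hgt]
      · rw [if_neg hgt, if_neg hgt]
        rw [seek_eq lines pattern s _ (fun x => x),
            seek_eq lines pattern s _ PySem.Str.rstrip,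
            seek_eq lines pattern s _ PySem.Str.strip]
        simp only [List.map_id']
        generalize (colScanB (lines.map PySem.Str.strip) (pattern.map PySem.Str.strip)
          (PySem.List.pyRange s ((lines.length : Int) - (pattern.length : Int) + 1))).head? = o3
        generalize (colScanB (lines.map PySem.Str.rstrip) (pattern.map PySem.Str.rstrip)
          (PySem.List.pyRange s ((lines.length : Int) - (pattern.length : Int) + 1))).head? = o2
        generalize (colScanB lines pattern
          (PySem.List.pyRange s ((lines.length : Int) - (pattern.length : Int) + 1))).head? = o1
        cases o1 <;> cases o2 <;> cases o3 <;> rfl
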